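-- pv_equiv track=rewrite | github.com/hyeonDD/aiffel | 26_mlops/05day/total_mlops/api_server/ml_app/api/endpoints/mlfow_train.py | make_word_to_index
-- ===== SOURCE A (Python) =====
-- from collections import Counter
--
-- def make_word_to_index(X_train):
--     word_list = []
--     for sent in X_train:
--         for word in sent:
--             word_list.append(word)
--
--     word_counts = Counter(word_list)
--     vocab = sorted(word_counts, key=word_counts.get, reverse=True)
--
--     threshold = 3
--     total_cnt = len(word_counts)  # 단어의 수
--     rare_cnt = 0  # 등장 빈도수가 threshold보다 작은 단어의 개수를 카운트
--     total_freq = 0  # 훈련 데이터의 전체 단어 빈도수 총 합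
--     rare_freq = 0  # 등장 빈도수가 threshold보다 작은 단어의 등장 빈도수의 총 합
--
--     # 단어와 빈도수의 쌍(pair)을 key와 value로 받는다.
--     for key, value in word_counts.items():
--         total_freq = total_freq + value
--
--         # 단어의 등장 빈도수가 threshold보다 작으면
--         if (value < threshold):
--             rare_cnt = rare_cnt + 1
--             rare_freq = rare_freq + value
--
--     # 전체 단어 개수 중 빈도수 2이하인 단어는 제거.
--     vocab_size = total_cnt - rare_cnt
--     vocab = vocab[:vocab_size]
--
--     word_to_index = {}
--     word_to_index['<PAD>'] = 0
--     word_to_index['<UNK>'] = 1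
--
--     for index, word in enumerate(vocab):
--         word_to_index[word] = index + 2
--     vocab_size = len(word_to_index)
--
--     return word_to_index
-- ===== SOURCE B (Python) =====
-- def make_word_to_index(X_train):
--     # Count words with a plain dict (insertion order = first occurrence).
--     counts = {}
--     for sent in X_train:
--         for word in sent:
--             counts[word] = counts.get(word, 0) + 1
--
--     # Bucket words by their count (counting sort) instead of comparison-sorting.
--     buckets = {}
--     max_count = 0
--     for word, c in counts.items():
--         buckets.setdefault(c, []).append(word)
--         if c > max_count:
--             max_count = c
--
--     # Walk counts downward; buckets below 3 are the rare words A drops.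
--     word_to_index = {'<PAD>': 0, '<UNK>': 1}
--     index = 2
--     for c in range(max_count, 2, -1):
--         for word in buckets.get(c, []):
--             word_to_index[word] = index
--             index += 1
--     return word_to_index
-- ===== Notes on version B (the rewrite author's own statement) =====
-- stated objective: alternative
-- what changed: Replaces A's comparison sort (sorted by count, reverse) plus rare-counting pass plus slice with a counting-sort: words are grouped into per-count buckets and emitted by walking the count range from max down to 3, assigning indices with a running counter.
import Mathlib
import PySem

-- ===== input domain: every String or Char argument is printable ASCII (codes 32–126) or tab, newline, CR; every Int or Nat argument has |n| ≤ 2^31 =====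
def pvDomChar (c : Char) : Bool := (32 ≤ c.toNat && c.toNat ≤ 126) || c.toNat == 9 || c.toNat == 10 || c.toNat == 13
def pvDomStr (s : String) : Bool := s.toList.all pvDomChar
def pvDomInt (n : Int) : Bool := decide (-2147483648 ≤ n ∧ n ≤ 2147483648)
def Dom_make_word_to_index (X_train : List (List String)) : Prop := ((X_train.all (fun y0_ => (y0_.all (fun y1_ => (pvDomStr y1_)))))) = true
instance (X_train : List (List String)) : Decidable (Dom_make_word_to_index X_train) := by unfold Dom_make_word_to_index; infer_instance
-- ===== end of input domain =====

-- B replaces A's comparison sort + rare-counting pass + slice by a counting sort: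
-- words are grouped into per-count buckets and emitted from the highest count down to 3 (objective: alternative).

-- ===== PORT A =====
-- Python key=word_counts.get: exact as getD w 0 since every sorted element is a key of the dict.
def make_word_to_index (X_train : List (List String)) : List (String × Int) :=
  let word_list := X_train.foldl (fun acc sent => sent.foldl (fun acc w => acc ++ [w]) acc) []
  let word_counts := PySem.Dict.counter word_list
  let vocab := PySem.List.sorted word_counts.keys (fun w => word_counts.getD w 0) true
  let total_cnt : Int := word_counts.size
  -- the loop over items with accumulators (total_freq, rare_cnt, rare_freq)
  let st := word_counts.items.foldl
      (fun (s : Int × Int × Int) kv =>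
        let total_freq := s.1 + kv.2
        if kv.2 < 3 then (total_freq, s.2.1 + 1, s.2.2 + kv.2) else (total_freq, s.2.1, s.2.2))
      (0, 0, 0)
  let rare_cnt := st.2.1
  let vocab_size := total_cnt - rare_cnt
  let vocab := PySem.List.slice vocab none (some vocab_size)
  let w2i := ((PySem.Dict.empty (κ := String) (ν := Int)).insert "<PAD>" 0).insert "<UNK>" 1
  let w2i := (PySem.List.enumerate vocab).foldl (fun d p => d.insert p.2 (p.1 + 2)) w2i
  w2i.items

-- ===== PORT B =====
def make_word_to_index_alt (X_train : List (List String)) : List (String × Int) :=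
  let counts := X_train.foldl
      (fun d sent => sent.foldl (fun (d : PySem.Dict String Int) w => d.insert w (d.getD w 0 + 1)) d)
      PySem.Dict.empty
  -- one pass: bucket each word under its count, track the running maximum count
  let st := counts.items.foldl
      (fun (s : PySem.Dict Int (List String) × Int) kv =>
        (s.1.modify kv.2 [] (· ++ [kv.1]), if kv.2 > s.2 then kv.2 else s.2))
      (PySem.Dict.empty, 0)
  let buckets := st.1
  let max_count := st.2
  let w2i := ((PySem.Dict.empty (κ := String) (ν := Int)).insert "<PAD>" 0).insert "<UNK>" 1
  -- counting sort: walk the counts downward, stop before the rare buckets (< 3)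
  let fin := (PySem.List.pyRange max_count 2 (-1)).foldl
      (fun (p : PySem.Dict String Int × Int) c =>
        (buckets.getD c []).foldl (fun p w => (p.1.insert w p.2, p.2 + 1)) p)
      (w2i, 2)
  fin.1.items

-- ===== PRECONDITION & SPEC =====
def Spec_make_word_to_index (X_train : List (List String)) (out : List (String × Int)) : Prop := out = make_word_to_index_alt X_train
instance (X_train : List (List String)) (out : List (String × Int)) : Decidable (Spec_make_word_to_index X_train out) := by unfold Spec_make_word_to_index; infer_instance

-- ===== CLAIM (what is proved, stated in full; the proofs are below) =====
def Claim_equal_make_word_to_index : Prop := ∀ (X_train : List (List String)), Dom_make_word_to_index X_train → Spec_make_word_to_index X_train (make_word_to_index X_train)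

-- ===== LEMMAS AND PROOFS =====

-- insertBy goes wholly to the left part when every element of the right part comes after x
theorem insertBy_append_left {α : Type} (before : α → α → Bool) (x : α) (A B : List α)
    (h : ∀ b ∈ B, before x b = true) :
    PySem.List.insertBy before x (A ++ B) = PySem.List.insertBy before x A ++ B := by
  induction A with
  | nil =>
    cases B with
    | nil => rfl
    | cons y ys => simp [PySem.List.insertBy, h y (by simp)]
  | cons a A ih =>
    simp only [List.cons_append, PySem.List.insertBy]
    by_cases hc : before x a = true
    · simp [hc]
    · simp [hc, ih]

-- insertBy goes wholly to the right part when no element of the left part comes after x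
theorem insertBy_append_right {α : Type} (before : α → α → Bool) (x : α) (A B : List α)
    (h : ∀ a ∈ A, before x a = false) :
    PySem.List.insertBy before x (A ++ B) = A ++ PySem.List.insertBy before x B := by
  induction A with
  | nil => rfl
  | cons a A ih =>
    simp only [List.cons_append, PySem.List.insertBy, h a (by simp)]
    simp [ih (fun a ha => h a (by simp [ha]))]

-- stable reverse sort splits at a key threshold
theorem sorted_rev_split {α : Type} (key : α → Int) (t : Int) (xs : List α) :
    PySem.List.sorted xs key true =
      PySem.List.sorted (xs.filter (fun x => decide (t ≤ key x))) key true ++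
      PySem.List.sorted (xs.filter (fun x => decide (key x < t))) key true := by
  induction xs using List.reverseRecOn with
  | nil => rfl
  | append_singleton xs x ih =>
    simp only [PySem.List.sorted_rev_eq_foldl_insertBy] at ih ⊢
    by_cases hx : t ≤ key x
    · rw [show (xs ++ [x]).filter (fun y => decide (t ≤ key y)) =
            xs.filter (fun y => decide (t ≤ key y)) ++ [x] from by
          simp [List.filter_append, hx],
        show (xs ++ [x]).filter (fun y => decide (key y < t)) =
            xs.filter (fun y => decide (key y < t)) from by
          simp [List.filter_append, show ¬(key x < t) from by omega]]
      simp only [List.foldl_append, List.foldl_cons, List.foldl_nil]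
      rw [ih]
      apply insertBy_append_left
      intro b hbm
      have hbm' : b ∈ PySem.List.sorted (xs.filter (fun y => decide (key y < t))) key true := by
        rw [PySem.List.sorted_rev_eq_foldl_insertBy]; exact hbm
      rw [PySem.List.mem_sorted] at hbm'
      have := List.of_mem_filter hbm'
      simp only [decide_eq_true_eq] at this ⊢
      omega
    · rw [show (xs ++ [x]).filter (fun y => decide (t ≤ key y)) =
            xs.filter (fun y => decide (t ≤ key y)) from by
          simp [List.filter_append, hx],
        show (xs ++ [x]).filter (fun y => decide (key y < t)) =
            xs.filter (fun y => decide (key y < t)) ++ [x] from by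
          simp [List.filter_append, show key x < t from by omega]]
      simp only [List.foldl_append, List.foldl_cons, List.foldl_nil]
      rw [ih]
      apply insertBy_append_right
      intro a ham
      have ham' : a ∈ PySem.List.sorted (xs.filter (fun y => decide (t ≤ key y))) key true := by
        rw [PySem.List.sorted_rev_eq_foldl_insertBy]; exact ham
      rw [PySem.List.mem_sorted] at ham'
      have := List.of_mem_filter ham'
      simp only [decide_eq_true_eq] at this
      simp only [decide_eq_false_iff_not, not_lt]
      omega

-- the stable reverse sort of the frequent words IS the descending walk over the count buckets
theorem bucket_sorted (key : String → Int) (k : Nat) :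
    ∀ (N : Int) (xs : List String), N ≤ 2 + k → (∀ x ∈ xs, key x ≤ N) →
    PySem.List.sorted (xs.filter (fun x => decide (3 ≤ key x))) key true =
      (PySem.List.pyRange N 2 (-1)).flatMap (fun c => xs.filter (fun x => key x == c)) := by
  induction k with
  | zero =>
    intro N xs hN hxs
    rw [PySem.List.pyRange_neg_one_eq_nil (by omega)]
    rw [List.filter_eq_nil_iff.2 (by intro x hx; have := hxs x hx; simp; omega)]
    simp [PySem.List.sorted]
  | succ k ih =>
    intro N xs hN hxs
    by_cases h2 : N ≤ 2
    · rw [PySem.List.pyRange_neg_one_eq_nil (by omega)]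
      rw [List.filter_eq_nil_iff.2 (by intro x hx; have := hxs x hx; simp; omega)]
      simp [PySem.List.sorted]
    · rw [PySem.List.pyRange_neg_one_cons (by omega), List.flatMap_cons]
      rw [sorted_rev_split key N]
      congr 1
      · -- the top bucket: all keys equal N, so the stable sort keeps it as-is
        rw [List.filter_filter]
        rw [List.filter_congr (q := fun x => key x == N)
            (by intro x hx
                have hk := hxs x hx
                rcases eq_or_ne (key x) N with he | he
                · simp [he]; omega
                · simp [he, show ¬ N ≤ key x from by omega])]
        apply PySem.List.sorted_rev_eq_self_of_pairwise
        apply List.pairwise_of_forall_mem_list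
        intro a ha b hb
        have ha' := List.of_mem_filter ha
        have hb' := List.of_mem_filter hb
        simp only [beq_iff_eq] at ha' hb'
        omega
      · -- the rest: recurse on the words with count < N
        rw [List.filter_filter]
        rw [List.filter_congr (q := fun x => decide (3 ≤ key x) && decide (key x < N))
            (by intro x _; exact Bool.and_comm _ _)]
        rw [← List.filter_filter]
        rw [ih (N - 1) (xs.filter (fun x => decide (key x < N))) (by omega)
            (by intro x hx; have := List.of_mem_filter hx; simp at this; omega)]
        apply List.flatMap_congr
        intro c hc
        rw [PySem.List.mem_pyRange_neg_one] at hc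
        rw [List.filter_filter]
        apply List.filter_congr
        intro x _
        by_cases he : key x = c
        · simp [he]; omega
        · simp [he]
-- A's triple-accumulator loop: the middle component counts the rare items
theorem rare_cnt_eq (l : List (String × Int)) (a b c : Int) :
    (l.foldl (fun (s : Int × Int × Int) kv =>
        if kv.2 < 3 then (s.1 + kv.2, s.2.1 + 1, s.2.2 + kv.2) else (s.1 + kv.2, s.2.1, s.2.2))
      (a, b, c)).2.1 = b + (l.countP (fun kv => decide (kv.2 < 3)) : Int) := by
  induction l generalizing a b c with
  | nil => simp
  | cons kv l ih =>
    simp only [List.foldl_cons, List.countP_cons]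
    by_cases h : kv.2 < 3
    · simp only [ih, h, decide_true, if_pos]
      push_cast; ring
    · simp only [ih, h, decide_false]
      simp

-- the flattened word list built by A's nested append loop
theorem word_list_eq (X_train : List (List String)) :
    X_train.foldl (fun acc sent => sent.foldl (fun acc w => acc ++ [w]) acc) [] =
      X_train.flatten := by
  suffices h : ∀ (acc : List String),
      X_train.foldl (fun acc sent => sent.foldl (fun acc w => acc ++ [w]) acc) acc =
        acc ++ X_train.flatten by simpa using h []
  induction X_train with
  | nil => simp
  | cons s t ih =>
    intro acc
    rw [List.foldl_cons, PySem.List.foldl_append_singleton_eq_self, ih, List.flatten_cons,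
      List.append_assoc]

-- B's (dict, index) loop over one bucket, as an enumerate fold
theorem inner_fold_eq (ws : List String) :
    ∀ (d : PySem.Dict String Int) (i : Int),
    ws.foldl (fun (p : PySem.Dict String Int × Int) w => (p.1.insert w p.2, p.2 + 1)) (d, i) =
      ((PySem.List.enumerate ws i).foldl (fun d p => d.insert p.2 p.1) d, i + ws.length) := by
  induction ws with
  | nil => intro d i; simp [PySem.List.enumerate_nil]
  | cons w ws ih =>
    intro d i
    rw [List.foldl_cons, ih, PySem.List.enumerate_cons, List.foldl_cons]
    refine Prod.ext ?_ ?_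
    · rfl
    · push_cast [List.length_cons]; ring

-- B's outer loop over the count range consumes the concatenation of the buckets
theorem outer_fold_eq (g : Int → List String) (cs : List Int) :
    ∀ (d : PySem.Dict String Int) (i : Int),
    cs.foldl (fun (p : PySem.Dict String Int × Int) c =>
        (g c).foldl (fun p w => (p.1.insert w p.2, p.2 + 1)) p) (d, i) =
      (cs.flatMap g).foldl (fun (p : PySem.Dict String Int × Int) w =>
        (p.1.insert w p.2, p.2 + 1)) (d, i) := by
  induction cs with
  | nil => intro d i; simp
  | cons c cs ih =>
    intro d i
    rw [List.foldl_cons, List.flatMap_cons, List.foldl_append]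
    obtain ⟨d', i'⟩ : PySem.Dict String Int × Int :=
      (g c).foldl (fun p w => (p.1.insert w p.2, p.2 + 1)) (d, i)
    exact ih d' i'

-- shifting the enumerate start into the inserted index
theorem enum_shift (ws : List String) :
    ∀ (s t : Int) (d : PySem.Dict String Int),
    (PySem.List.enumerate ws s).foldl (fun d p => d.insert p.2 (p.1 + t)) d =
      (PySem.List.enumerate ws (s + t)).foldl (fun d p => d.insert p.2 p.1) d := by
  induction ws with
  | nil => intro s t d; simp [PySem.List.enumerate_nil]
  | cons w ws ih =>
    intro s t d
    rw [PySem.List.enumerate_cons, PySem.List.enumerate_cons, List.foldl_cons, List.foldl_cons,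
      ih, show s + 1 + t = s + t + 1 from by ring]

-- ===== VERDICT (by name: the statement is the Claim_ definition above) =====
theorem make_word_to_index_spec : Claim_equal_make_word_to_index := by
  intro X_train _
  unfold Spec_make_word_to_index make_word_to_index make_word_to_index_alt
  dsimp only
  rw [word_list_eq]
  set d := PySem.Dict.counter X_train.flatten with hd
  set key : String → Int := fun w => d.getD w 0 with hkey
  have hnd : d.keys.Nodup := PySem.Dict.nodup_keys_counter _
  -- the rare count over items equals the rare count over keys
  have hcnt : (d.items.countP (fun kv => decide (kv.2 < 3))) =
      d.keys.countP (fun w => decide (key w < 3)) := by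
    show _ = (d.items.map (·.1)).countP _
    rw [List.countP_map]
    apply List.countP_congr
    intro p hp
    have hg : d.getD p.1 0 = p.2 :=
      PySem.Dict.getD_of_mem_items d (by simpa using hp) hnd 0
    simp [Function.comp, hkey, hg]
  rw [rare_cnt_eq]
  have hsplit := sorted_rev_split key 3 d.keys
  have hsize : (d.size : Int) = (d.keys.length : Int) := by
    simp [PySem.Dict.size, PySem.Dict.keys]
  have hlen : d.keys.length = d.keys.countP (fun w => decide (3 ≤ key w)) +
      d.keys.countP (fun w => decide (key w < 3)) := by
    rw [List.length_eq_countP_add_countP (fun w => decide (3 ≤ key w))]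
    congr 1
    apply List.countP_congr
    intro w _
    simp [not_le]
  have hnn : (0:Int) ≤ (d.size : Int) - (0 + (d.items.countP (fun kv => decide (kv.2 < 3)) : Int)) := by
    rw [hcnt, hsize, hlen]; push_cast; omega
  rw [PySem.List.slice_to _ hnn]
  have htonat : ((d.size : Int) - (0 + (d.items.countP (fun kv => decide (kv.2 < 3)) : Int))).toNat =
      (d.keys.filter (fun w => decide (3 ≤ key w))).length := by
    rw [hcnt, hsize, hlen, ← List.countP_eq_length_filter]
    push_cast; omega
  rw [htonat, hsplit]
  have htake : List.take ((d.keys.filter (fun w => decide (3 ≤ key w))).length)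
      (PySem.List.sorted (d.keys.filter (fun w => decide (3 ≤ key w))) key true ++
       PySem.List.sorted (d.keys.filter (fun w => decide (key w < 3))) key true) =
      PySem.List.sorted (d.keys.filter (fun w => decide (3 ≤ key w))) key true := by
    rw [← PySem.List.length_sorted (d.keys.filter (fun w => decide (3 ≤ key w))) key true]
    exact List.take_left
  rw [htake]
  -- ---- B side ----
  have hcounts : X_train.foldl
      (fun d sent => sent.foldl (fun (d : PySem.Dict String Int) w => d.insert w (d.getD w 0 + 1)) d)
      PySem.Dict.empty = d := by
    rw [← List.foldl_flatten, PySem.Dict.foldl_insert_getD_add_one_eq_counter]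
  rw [hcounts]
  rw [PySem.List.foldl_prod_mk
      (f := fun (b : PySem.Dict Int (List String)) (kv : String × Int) => b.modify kv.2 [] (· ++ [kv.1]))
      (g := fun (m : Int) (kv : String × Int) => if kv.2 > m then kv.2 else m)]
  dsimp only
  set M := d.items.foldl (fun (m : Int) (kv : String × Int) => if kv.2 > m then kv.2 else m) 0 with hMdef
  have hMmax : M = d.items.foldl (fun (m : Int) kv => max m kv.2) 0 := by
    rw [hMdef]
    exact PySem.List.foldl_congr_mem d.items
      (fun (m : Int) (kv : String × Int) => if kv.2 > m then kv.2 else m)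
      (fun (m : Int) (kv : String × Int) => max m kv.2) 0
      (fun acc kv _ => by simp only [max_def_lt])
  have hMle : (0:Int) ≤ M ∧ ∀ kv ∈ d.items, kv.2 ≤ M := by
    rw [hMmax]
    exact PySem.List.le_foldl_max_int d.items (·.2) 0
  have hkeyle : ∀ w ∈ d.keys, key w ≤ M := by
    intro w hw
    have : (w, key w) ∈ d.items := by
      rw [PySem.Dict.items_eq_map_keys d hnd (0:Int)]
      exact List.mem_map_of_mem hw
    exact hMle.2 _ this
  have hbucket : ∀ c : Int,
      (d.items.foldl (fun (b : PySem.Dict Int (List String)) kv => b.modify kv.2 [] (· ++ [kv.1]))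
        PySem.Dict.empty).getD c [] = d.keys.filter (fun w => key w == c) := by
    intro c
    have h1 : d.items.foldl (fun (b : PySem.Dict Int (List String)) kv => b.modify kv.2 [] (· ++ [kv.1]))
        PySem.Dict.empty
        = (d.keys.map (fun k => ((key k, k) : Int × String))).foldl
            (fun b p => b.modify p.1 [] (· ++ [p.2])) PySem.Dict.empty := by
      rw [PySem.Dict.items_eq_map_keys d hnd (0:Int), List.foldl_map, List.foldl_map]
    rw [h1, PySem.Dict.getD_foldl_modify_append]
    simp [List.filter_map, Function.comp_def]
  have hVeq : PySem.List.sorted (d.keys.filter (fun w => decide (3 ≤ key w))) key true =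
      (PySem.List.pyRange M 2 (-1)).flatMap (fun c => d.keys.filter (fun w => key w == c)) :=
    bucket_sorted key M.toNat M d.keys (by omega) hkeyle
  rw [PySem.List.foldl_congr_mem (PySem.List.pyRange M 2 (-1))
      (fun (p : PySem.Dict String Int × Int) c =>
        ((d.items.foldl (fun (b : PySem.Dict Int (List String)) kv => b.modify kv.2 [] (· ++ [kv.1]))
          PySem.Dict.empty).getD c []).foldl (fun p w => (p.1.insert w p.2, p.2 + 1)) p)
      (fun (p : PySem.Dict String Int × Int) c =>
        (d.keys.filter (fun w => key w == c)).foldl (fun p w => (p.1.insert w p.2, p.2 + 1)) p)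
      (((PySem.Dict.empty.insert "<PAD>" (0:Int)).insert "<UNK>" 1, (2:Int)))
      (fun acc c _ => by simp only [hbucket])]
  rw [outer_fold_eq, ← hVeq, inner_fold_eq]
  dsimp only
  rw [enum_shift]
  norm_num
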